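-- pv_equiv track=rewrite | github.com/dexterchan/DailyChallenge | NOV2019/FallingDominoes.py | __placeHolderRight
-- ===== SOURCE A (Python) =====
-- def __placeHolderRight(d):
--     tmp = []
--     prev = None
--     for i in range (0,len(d)):
--         if prev is None:
--             prev = d[i]
--             tmp.append(d[i])
--             continue
--         if prev == 'R' and d[i] == '.':
--             prev = d[i]
--             tmp.append('R')
--         else:
--             prev = d[i]
--             tmp.append(d[i])
--     return "".join(tmp)
-- ===== SOURCE B (Python) =====
-- def __placeHolderRight(d):
--     # non-overlapping pattern rewrite: consume the two-token pattern ('R', '.') as a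
--     # unit emitting 'R','R', otherwise consume one token; no carried prev-state.
--     out = []
--     i = 0
--     n = len(d)
--     while i < n:
--         if d[i] == 'R' and i + 1 < n and d[i + 1] == '.':
--             out.append('R')
--             out.append('R')
--             i += 2
--         else:
--             out.append(d[i])
--             i += 1
--     return "".join(out)
-- ===== Notes on version B (the rewrite author's own statement) =====
-- stated objective: alternative
-- what changed: Replaced A's prev-state streaming loop by non-overlapping two-token pattern consumption (str.replace('R.','RR')-style): on a match both tokens are consumed at once and 'R','R' emitted, so no previous-element state is carried.
import Mathlib
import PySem

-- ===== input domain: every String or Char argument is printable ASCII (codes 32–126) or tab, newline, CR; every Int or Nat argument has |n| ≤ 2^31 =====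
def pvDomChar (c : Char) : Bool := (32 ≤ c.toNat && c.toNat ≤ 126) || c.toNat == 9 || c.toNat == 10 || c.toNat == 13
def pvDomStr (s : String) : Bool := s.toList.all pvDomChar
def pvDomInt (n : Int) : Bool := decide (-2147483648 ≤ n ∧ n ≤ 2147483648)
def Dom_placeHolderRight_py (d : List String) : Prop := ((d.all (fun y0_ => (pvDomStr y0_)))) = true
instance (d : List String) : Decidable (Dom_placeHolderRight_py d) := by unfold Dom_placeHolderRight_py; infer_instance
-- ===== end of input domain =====

-- B replaces A's prev-state streaming loop by non-overlapping two-token pattern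
-- consumption ('R','.' consumed together, emitting 'R','R'); objective: alternative.

-- ===== PORT A =====
-- the loop body of A: state is (tmp, prev)
def pvStepA (st : List String × Option String) (x : String) : List String × Option String :=
  match st.2 with
  | none => (st.1 ++ [x], some x)
  | some prev =>
    if prev = "R" ∧ x = "." then (st.1 ++ ["R"], some x)
    else (st.1 ++ [x], some x)

def placeHolderRight_py (d : List String) : String :=
  let st := (PySem.List.pyRange 0 (PySem.List.len d) 1).foldl
    (fun st i => pvStepA st (PySem.List.pyGetD d i "")) ([], none)
  PySem.Str.join "" st.1

-- ===== PORT B =====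
-- B's while loop consumes one or two elements per step: the obvious recursion on the list.
def pvAltGo : List String → List String
  | [] => []
  | [x] => [x]
  | x :: y :: rest =>
    if x = "R" ∧ y = "." then "R" :: "R" :: pvAltGo rest
    else x :: pvAltGo (y :: rest)

def placeHolderRight_py_alt (d : List String) : String :=
  PySem.Str.join "" (pvAltGo d)

-- ===== PRECONDITION & SPEC =====
def Spec_placeHolderRight_py (d : List String) (out : String) : Prop := out = placeHolderRight_py_alt d
instance (d : List String) (out : String) : Decidable (Spec_placeHolderRight_py d out) := by unfold Spec_placeHolderRight_py; infer_instance

-- ===== CLAIM (what is proved, stated in full; the proofs are below) =====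
def Claim_equal_placeHolderRight_py : Prop := ∀ (d : List String), Dom_placeHolderRight_py d → Spec_placeHolderRight_py d (placeHolderRight_py d)

-- ===== LEMMAS AND PROOFS =====
-- the emitted element of A's loop, as a function of (prev, current)
def pvEmit (prev : Option String) (x : String) : String :=
  if prev = some "R" ∧ x = "." then "R" else x

-- A's loop as a prev-carrying list recursion
def pvGA (prev : Option String) : List String → List String
  | [] => []
  | x :: xs => pvEmit prev x :: pvGA (some x) xs

lemma pvStepA_eq (acc : List String) (prev : Option String) (x : String) :
    pvStepA (acc, prev) x = (acc ++ [pvEmit prev x], some x) := by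
  cases prev with
  | none => simp [pvStepA, pvEmit]
  | some p =>
    by_cases h : p = "R" ∧ x = "."
    · simp [pvStepA, pvEmit, h]
    · simp [pvStepA, pvEmit, h]

lemma pvFoldA (xs : List String) (acc : List String) (prev : Option String) :
    (xs.foldl pvStepA (acc, prev)).1 = acc ++ pvGA prev xs := by
  induction xs generalizing acc prev with
  | nil => simp [pvGA]
  | cons x xs ih => simp [List.foldl_cons, pvStepA_eq, pvGA, ih]

lemma pvGA_irrel (p : Option String) (hp : p ≠ some "R") (xs : List String) :
    pvGA p xs = pvGA none xs := by
  cases xs with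
  | nil => rfl
  | cons x xs => simp [pvGA, pvEmit, hp]

lemma pvAltGo_eq (xs : List String) : pvAltGo xs = pvGA none xs := by
  induction xs using pvAltGo.induct with
  | case1 => rfl
  | case2 x => simp [pvAltGo, pvGA, pvEmit]
  | case3 x y rest h ih =>
    obtain ⟨hx, hy⟩ := h
    subst hx; subst hy
    have hir : pvGA (some ".") rest = pvGA none rest := pvGA_irrel (some ".") (by simp) rest
    simp [pvAltGo, pvGA, pvEmit, ih, hir]
  | case4 x y rest h ih =>
    simp only [pvAltGo, if_neg h, pvGA, ih]
    by_cases hx : x = "R"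
    · have hy : y ≠ "." := fun hy => h ⟨hx, hy⟩
      simp [pvEmit, hx, hy]
    · simp [pvEmit, hx]

-- ===== VERDICT (by name: the statement is the Claim_ definition above) =====
theorem placeHolderRight_py_spec : Claim_equal_placeHolderRight_py := by
  intro d _
  show placeHolderRight_py d = placeHolderRight_py_alt d
  unfold placeHolderRight_py placeHolderRight_py_alt
  rw [PySem.List.foldl_pyRange_zero_pyGetD d "" pvStepA ([], none)]
  simp only [pvFoldA d [] none, List.nil_append, pvAltGo_eq]
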